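-- pv_equiv track=rewrite | github.com/tensorflow/tensor2tensor | tensor2tensor/data_generators/wiki.py | _dump_to_pages
-- ===== SOURCE A (Python) =====
-- def _dump_to_pages(dump):
--   """Extract pages from an xml dump.
--
--   Args:
--     dump: a unicode string
--   Returns:
--     a list of unicode strings
--   """
--   pos = 0
--   ret = []
--   start_tag = u"<page>\n"
--   end_tag = u"</page>\n"
--   while True:
--     start_pos = dump.find(start_tag, pos)
--     if start_pos == -1:
--       break
--     start_pos += len(start_tag)
--     end_pos = dump.find(end_tag, start_pos)
--     if end_pos == -1:
--       break
--     ret.append(dump[start_pos:end_pos])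
--     pos = end_pos + len(end_tag)
--   return ret
-- ===== SOURCE B (Python) =====
-- def _dump_to_pages(dump):
--   """Extract pages from an xml dump.
--
--   Alternative strategy: repeatedly cut the dump at the first end tag and
--   inspect only the segment before it for a start tag.
--
--   Args:
--     dump: a unicode string
--   Returns:
--     a list of unicode strings
--   """
--   start_tag = u"<page>\n"
--   end_tag = u"</page>\n"
--   ret = []
--   while True:
--     end_pos = dump.find(end_tag)
--     if end_pos == -1:
--       return ret
--     segment = dump[:end_pos]
--     start_pos = segment.find(start_tag)
--     if start_pos != -1:
--       ret.append(segment[start_pos + len(start_tag):])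
--     dump = dump[end_pos + len(end_tag):]
-- ===== Notes on version B (the rewrite author's own statement) =====
-- stated objective: alternative
-- what changed: Instead of keeping an absolute cursor and searching for the start tag first, B repeatedly cuts the dump at the first end tag and looks for the start tag only inside the segment before it, emitting the segment's tail after the start tag.
import Mathlib
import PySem

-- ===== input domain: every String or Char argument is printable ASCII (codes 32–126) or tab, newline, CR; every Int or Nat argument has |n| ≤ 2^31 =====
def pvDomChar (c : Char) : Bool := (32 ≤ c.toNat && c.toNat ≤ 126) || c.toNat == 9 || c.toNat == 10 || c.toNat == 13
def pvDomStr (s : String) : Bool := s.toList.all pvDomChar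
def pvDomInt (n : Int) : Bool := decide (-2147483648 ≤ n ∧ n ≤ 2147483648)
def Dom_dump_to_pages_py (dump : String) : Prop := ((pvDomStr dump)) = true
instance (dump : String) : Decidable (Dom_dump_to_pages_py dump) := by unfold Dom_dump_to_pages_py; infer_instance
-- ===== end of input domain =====

-- B cuts the dump at each first end tag and searches the start tag only inside that segment
-- (a different traversal than A's absolute-cursor start-first scan); same results, no speed claim.

-- ===== PORT A =====
def pvStartTag : List Char := ['<', 'p', 'a', 'g', 'e', '>', '\n']
def pvEndTag : List Char := ['<', '/', 'p', 'a', 'g', 'e', '>', '\n']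

-- the while-loop of A: absolute cursor pos, find the start tag, then the end tag after it
def dumpToPagesGo (dump : List Char) (fuel : Nat) (pos : Nat) (ret : List (List Char)) :
    List (List Char) :=
  match fuel with
  | 0 => ret
  | fuel + 1 =>
    let startPos := PySem.Chars.findFrom dump pvStartTag (pos : Int)
    if startPos = -1 then ret
    else
      let startPos' := startPos.toNat + 7
      let endPos := PySem.Chars.findFrom dump pvEndTag (startPos' : Int)
      if endPos = -1 then ret
      else dumpToPagesGo dump fuel (endPos.toNat + 8)
             (ret ++ [PySem.Chars.slice dump (some (startPos' : Int)) (some endPos)])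

def dump_to_pages_py (dump : String) : List String :=
  (dumpToPagesGo dump.toList (dump.toList.length + 1) 0 []).map String.ofList

-- ===== PORT B =====
-- the while-loop of B: cut at the first end tag, inspect only the segment before it
def dumpToPagesAltGo (dump : List Char) (fuel : Nat) (ret : List (List Char)) :
    List (List Char) :=
  match fuel with
  | 0 => ret
  | fuel + 1 =>
    let endPos := PySem.Chars.find dump pvEndTag
    if endPos = -1 then ret
    else
      let segment := PySem.Chars.slice dump none (some endPos)
      let startPos := PySem.Chars.find segment pvStartTag
      let ret' := if startPos ≠ -1 then
          ret ++ [PySem.Chars.slice segment (some (startPos + 7)) none] else ret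
      dumpToPagesAltGo (PySem.Chars.slice dump (some (endPos + 8)) none) fuel ret'

def dump_to_pages_py_alt (dump : String) : List String :=
  (dumpToPagesAltGo dump.toList (dump.toList.length + 1) []).map String.ofList

-- ===== PRECONDITION & SPEC =====
def Spec_dump_to_pages_py (dump : String) (out : List String) : Prop := out = dump_to_pages_py_alt dump
instance (dump : String) (out : List String) : Decidable (Spec_dump_to_pages_py dump out) := by unfold Spec_dump_to_pages_py; infer_instance

-- ===== CLAIM (what is proved, stated in full; the proofs are below) =====
def Claim_equal_dump_to_pages_py : Prop := ∀ (dump : String), Dom_dump_to_pages_py dump → Spec_dump_to_pages_py dump (dump_to_pages_py dump)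

-- ===== LEMMAS AND PROOFS =====

lemma infix_iff_drop (sub u : List Char) : sub <:+: u ↔ ∃ j, sub <+: u.drop j := by
  constructor
  · rintro ⟨p, q, rfl⟩
    exact ⟨p.length, by simp⟩
  · rintro ⟨j, r, hr⟩
    exact ⟨u.take j, r, by rw [List.append_assoc, hr, List.take_append_drop]⟩

lemma occ_bound {sub u : List Char} {j : Nat} (hne : sub ≠ []) (h : sub <+: u.drop j) :
    j + sub.length ≤ u.length := by
  have h1 := h.length_le
  have h2 : 0 < sub.length := List.length_pos_iff.mpr hne
  simp [List.length_drop] at h1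
  omega

lemma prefix_of_prefix_append {a x r : List Char} (h : a <+: x ++ r) (hl : x.length ≤ a.length) :
    x <+: a := by
  obtain ⟨t, ht⟩ := h
  have hx : x = (a ++ t).take x.length := by
    rw [ht]; simp
  have h2 : (a ++ t).take x.length = a.take x.length :=
    List.take_append_of_le_length hl
  rw [hx, h2]
  exact List.take_prefix _ _

lemma find_eq_coe_iff (t sub : List Char) (m : Nat) :
    PySem.Chars.find t sub = (m : Int) ↔
      (sub <+: t.drop m ∧ ∀ i, i < m → ¬ sub <+: t.drop i) := by
  constructor
  · intro h
    have hnn : (0 : Int) ≤ PySem.Chars.find t sub := by rw [h]; positivity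
    have hspec := PySem.Chars.find_spec hnn
    rw [h] at hspec
    simpa using hspec
  · rintro ⟨hocc, hmin⟩
    have hinf : sub <:+: t := (infix_iff_drop sub t).mpr ⟨m, hocc⟩
    have hnn : (0 : Int) ≤ PySem.Chars.find t sub := (PySem.Chars.find_nonneg_iff t sub).mpr hinf
    have hspec := PySem.Chars.find_spec hnn
    have heq : (PySem.Chars.find t sub).toNat = m := by
      rcases Nat.lt_trichotomy (PySem.Chars.find t sub).toNat m with h | h | h
      · exact absurd hspec.1 (hmin _ h)
      · exact h
      · exact absurd hocc (hspec.2 m h)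
    omega

lemma no_overlap {u : List Char} {i e : Nat}
    (hst : pvStartTag <+: u.drop i) (hen : pvEndTag <+: u.drop e) :
    i + 7 ≤ e ∨ e + 8 ≤ i := by
  by_contra hcon
  simp only [not_or, Nat.not_le] at hcon
  obtain ⟨h1, h2⟩ := hcon
  by_cases hle : i ≤ e
  · -- d := e - i ≤ 6 : pvStartTag.drop d is a prefix of pvEndTag — impossible
    set d := e - i with hd
    have hd6 : d ≤ 6 := by omega
    obtain ⟨r, hr⟩ := hst
    have hdrop : u.drop e = pvStartTag.drop d ++ r := by
      have : u.drop e = (u.drop i).drop d := by rw [List.drop_drop]; congr 1; omega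
      rw [this, ← hr, List.drop_append_of_le_length (by simp [pvStartTag]; omega)]
    rw [hdrop] at hen
    have hpre : pvStartTag.drop d <+: pvEndTag :=
      prefix_of_prefix_append hen (by simp [pvStartTag, pvEndTag]; omega)
    interval_cases d <;> simp [pvStartTag, pvEndTag, List.cons_prefix_cons] at hpre
  · -- d := i - e ∈ [1,7] : pvEndTag.drop d is a prefix of pvStartTag — impossible
    have hlt : e < i := by omega
    set d := i - e with hd
    have hd7 : 1 ≤ d ∧ d ≤ 7 := ⟨by omega, by omega⟩
    
    obtain ⟨r, hr⟩ := hen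
    have hdrop : u.drop i = pvEndTag.drop d ++ r := by
      have : u.drop i = (u.drop e).drop d := by rw [List.drop_drop]; congr 1; omega
      rw [this, ← hr, List.drop_append_of_le_length (by simp [pvEndTag]; omega)]
    rw [hdrop] at hst
    have hpre : pvEndTag.drop d <+: pvStartTag :=
      prefix_of_prefix_append hst (by simp [pvStartTag, pvEndTag]; omega)
    obtain ⟨hd1, hd7'⟩ := hd7
    interval_cases d <;> simp [pvStartTag, pvEndTag, List.cons_prefix_cons] at hpre

lemma infix_of_infix_take {sub t : List Char} {m : Nat} (h : sub <:+: t.take m) : sub <:+: t :=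
  h.trans (List.take_prefix m t).isInfix

lemma infix_of_infix_drop {sub t : List Char} {m : Nat} (h : sub <:+: t.drop m) : sub <:+: t :=
  h.trans (List.drop_suffix m t).isInfix

lemma altGo_no_start (fuel : Nat) : ∀ (t : List Char) (ret : List (List Char)),
    ¬ pvStartTag <:+: t → dumpToPagesAltGo t fuel ret = ret := by
  induction fuel with
  | zero => intro t ret _; rfl
  | succ f ih =>
    intro t ret h
    by_cases he : PySem.Chars.find t pvEndTag = -1
    · simp [dumpToPagesAltGo, he]
    · have hnn : (0 : Int) ≤ PySem.Chars.find t pvEndTag := by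
        have := PySem.Chars.neg_one_le_find t pvEndTag
        omega
      have hseg : PySem.Chars.slice t none (some (PySem.Chars.find t pvEndTag))
          = t.take (PySem.Chars.find t pvEndTag).toNat := by
        rw [PySem.Chars.slice_eq_listSlice, PySem.List.slice_to _ hnn]
      have hsegfind : PySem.Chars.find (t.take (PySem.Chars.find t pvEndTag).toNat) pvStartTag = -1 := by
        rw [PySem.Chars.find_eq_neg_one_iff]
        exact fun hc => h (infix_of_infix_take hc)
      have hrest : PySem.Chars.slice t (some (PySem.Chars.find t pvEndTag + 8)) none
          = t.drop ((PySem.Chars.find t pvEndTag).toNat + 8) := by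
        rw [PySem.Chars.slice_eq_listSlice, PySem.List.slice_from _ (by omega : (0:Int) ≤ PySem.Chars.find t pvEndTag + 8)]
        congr 1
        omega
      simp only [dumpToPagesAltGo, he, if_false, hseg, hsegfind, hrest]
      simp only [ne_eq, not_true_eq_false, if_false]
      exact ih _ ret (fun hc => h (infix_of_infix_drop hc))

lemma go_shift (s : List Char) (f k k' : Nat) (ret : List (List Char))
    (hkk : k ≤ k') (hk' : k' ≤ s.length)
    (hno : ∀ j, k ≤ j → j < k' → ¬ pvStartTag <+: s.drop j) :
    dumpToPagesGo s (f + 1) k ret = dumpToPagesGo s (f + 1) k' ret := by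
  have hkl : k ≤ s.length := le_trans hkk hk'
  have hA : PySem.Chars.findFrom s pvStartTag (k : Int) = PySem.Chars.findFrom s pvStartTag (k' : Int) := by
    rw [PySem.Chars.findFrom_natCast s pvStartTag k hkl,
        PySem.Chars.findFrom_natCast s pvStartTag k' hk']
    by_cases h2 : PySem.Chars.find (s.drop k') pvStartTag = -1
    · have h1 : PySem.Chars.find (s.drop k) pvStartTag = -1 := by
        rw [PySem.Chars.find_eq_neg_one_iff] at h2 ⊢
        intro hc
        rcases (infix_iff_drop _ _).mp hc with ⟨j, hj⟩
        rw [List.drop_drop] at hj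
        by_cases hjk : k + j < k'
        · exact hno (k + j) (by omega) hjk hj
        · exact h2 ((infix_iff_drop _ _).mpr ⟨k + j - k', by
            rw [List.drop_drop]
            have : k' + (k + j - k') = k + j := by omega
            rw [this]
            exact hj⟩)
      rw [h1, h2]
      simp
    · have hnn : (0 : Int) ≤ PySem.Chars.find (s.drop k') pvStartTag := by
        have := PySem.Chars.neg_one_le_find (s.drop k') pvStartTag
        omega
      set p' := (PySem.Chars.find (s.drop k') pvStartTag).toNat with hp'
      have hco : PySem.Chars.find (s.drop k') pvStartTag = (p' : Int) := by omega
      rw [hco]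
      obtain ⟨hocc, hmin⟩ := (find_eq_coe_iff (s.drop k') pvStartTag p').mp hco
      rw [List.drop_drop] at hocc
      have h1 : PySem.Chars.find (s.drop k) pvStartTag = ((k' + p' - k : Nat) : Int) := by
        rw [find_eq_coe_iff]
        constructor
        · rw [List.drop_drop]
          have : k + (k' + p' - k) = k' + p' := by omega
          rw [this]
          exact hocc
        · intro i hi hc
          rw [List.drop_drop] at hc
          by_cases hik : k + i < k'
          · exact hno (k + i) (by omega) hik hc
          · refine hmin (k + i - k') (by omega) ?_
            rw [List.drop_drop]
            have : k' + (k + i - k') = k + i := by omega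
            rw [this]
            exact hc
      rw [h1]
      have : ¬ ((k' + p' - k : Nat) : Int) = -1 := by omega
      rw [if_neg this, if_neg (by omega : ¬ ((p' : Nat) : Int) = -1)]
      omega
  simp only [dumpToPagesGo, hA]

lemma main_lemma : ∀ (n : Nat) (s : List Char) (k : Nat) (ret : List (List Char)) (fA fB : Nat),
    k ≤ s.length → s.length - k = n → n + 1 ≤ fA → n + 1 ≤ fB →
    dumpToPagesGo s fA k ret = dumpToPagesAltGo (s.drop k) fB ret := by
  intro n
  induction n using Nat.strong_induction_on with
  | _ n ih =>
  intro s k ret fA fB hk hn hfA hfB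
  obtain ⟨fA', rfl⟩ : ∃ m, fA = m + 1 := ⟨fA - 1, by omega⟩
  obtain ⟨fB', rfl⟩ : ∃ m, fB = m + 1 := ⟨fB - 1, by omega⟩
  have htl : (s.drop k).length = n := by simp; omega
  by_cases he : PySem.Chars.find (s.drop k) pvEndTag = -1
  · -- no end tag at all after pos: both sides return ret
    have hrhs : dumpToPagesAltGo (s.drop k) (fB' + 1) ret = ret := by
      simp only [dumpToPagesAltGo, he]
      simp
    rw [hrhs]
    by_cases hsp : PySem.Chars.findFrom s pvStartTag (k : Int) = -1
    · simp only [dumpToPagesGo, hsp]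
      simp
    · -- a start tag exists, but the end-tag search after it must fail
      rw [PySem.Chars.findFrom_natCast s pvStartTag k hk] at hsp
      by_cases hst : PySem.Chars.find (s.drop k) pvStartTag = -1
      · rw [hst] at hsp; simp at hsp
      · have hnnp : (0 : Int) ≤ PySem.Chars.find (s.drop k) pvStartTag := by
          have := PySem.Chars.neg_one_le_find (s.drop k) pvStartTag
          omega
        set p := (PySem.Chars.find (s.drop k) pvStartTag).toNat with hpdef
        have hp : PySem.Chars.find (s.drop k) pvStartTag = (p : Int) := by omega
        obtain ⟨hoccp, hminp⟩ := (find_eq_coe_iff (s.drop k) pvStartTag p).mp hp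
        have hoccs : pvStartTag <+: s.drop (k + p) := by rw [← List.drop_drop]; exact hoccp
        have hlen7 : k + p + 7 ≤ s.length := by
          have := occ_bound (by simp [pvStartTag]) hoccs
          simp [pvStartTag] at this
          omega
        have hend : PySem.Chars.findFrom s pvEndTag ((k + p + 7 : Nat) : Int) = -1 := by
          rw [PySem.Chars.findFrom_natCast s pvEndTag (k + p + 7) hlen7]
          have : PySem.Chars.find (s.drop (k + p + 7)) pvEndTag = -1 := by
            rw [PySem.Chars.find_eq_neg_one_iff]
            intro hc
            rw [PySem.Chars.find_eq_neg_one_iff] at he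
            have : s.drop (k + p + 7) = (s.drop k).drop (p + 7) := by
              rw [List.drop_drop, ← Nat.add_assoc]
            rw [this] at hc
            exact he (infix_of_infix_drop hc)
          rw [this, if_pos rfl]
        simp only [dumpToPagesGo, PySem.Chars.findFrom_natCast s pvStartTag k hk, hp,
          if_neg (by omega : ¬ ((p : Nat) : Int) = -1)]
        have hcast : ((k : Int) + (p : Int)).toNat + 7 = k + p + 7 := by omega
        rw [if_neg (by omega : ¬ ((k : Int) + (p : Int)) = -1), hcast, hend]
        simp
  · -- there is an end tag at e in the remainder
    have hnne : (0 : Int) ≤ PySem.Chars.find (s.drop k) pvEndTag := by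
      have := PySem.Chars.neg_one_le_find (s.drop k) pvEndTag
      omega
    set e := (PySem.Chars.find (s.drop k) pvEndTag).toNat with hedef
    have hen : PySem.Chars.find (s.drop k) pvEndTag = (e : Int) := by omega
    obtain ⟨hocce, hmine⟩ := (find_eq_coe_iff (s.drop k) pvEndTag e).mp hen
    have he8 : e + 8 ≤ n := by
      have := occ_bound (by simp [pvEndTag]) hocce
      simp [pvEndTag] at this
      omega
    have hseg : PySem.Chars.slice (s.drop k) none (some ((e : Nat) : Int))
        = (s.drop k).take e := by
      rw [PySem.Chars.slice_eq_listSlice, PySem.List.slice_to _ (by omega : (0:Int) ≤ ((e : Nat) : Int))]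
      simp
    have hrestcast : ((e : Nat) : Int) + 8 = ((e + 8 : Nat) : Int) := by omega
    have hrest : PySem.Chars.slice (s.drop k) (some (((e : Nat) : Int) + 8)) none
        = s.drop (k + (e + 8)) := by
      rw [PySem.Chars.slice_eq_listSlice, hrestcast, PySem.List.slice_from_natCast]
      rw [List.drop_drop]
    by_cases hst : PySem.Chars.find (s.drop k) pvStartTag = -1
    · -- no start tag at all: A stops; B keeps consuming end tags, appending nothing
      have hnoinf : ¬ pvStartTag <:+: (s.drop k) := by
        rw [← PySem.Chars.find_eq_neg_one_iff]; exact hst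
      have hlhs : dumpToPagesGo s (fA' + 1) k ret = ret := by
        simp only [dumpToPagesGo, PySem.Chars.findFrom_natCast s pvStartTag k hk, hst]
        simp
      have hsegfind : PySem.Chars.find ((s.drop k).take e) pvStartTag = -1 := by
        rw [PySem.Chars.find_eq_neg_one_iff]
        exact fun hc => hnoinf (infix_of_infix_take hc)
      have hrhs : dumpToPagesAltGo (s.drop k) (fB' + 1) ret = ret := by
        simp only [dumpToPagesAltGo, hen, if_neg (by omega : ¬ ((e : Nat) : Int) = -1),
          hseg, hsegfind, hrest]
        simp only [ne_eq, not_true_eq_false, if_false]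
        exact altGo_no_start fB' _ ret (fun hc => hnoinf (infix_of_infix_drop
          (show pvStartTag <:+: (s.drop k).drop (e + 8) by rw [List.drop_drop]; exact hc)))
      rw [hlhs, hrhs]
    · -- a start tag exists at p
      have hnnp : (0 : Int) ≤ PySem.Chars.find (s.drop k) pvStartTag := by
        have := PySem.Chars.neg_one_le_find (s.drop k) pvStartTag
        omega
      set p := (PySem.Chars.find (s.drop k) pvStartTag).toNat with hpdef
      have hp : PySem.Chars.find (s.drop k) pvStartTag = (p : Int) := by omega
      obtain ⟨hoccp, hminp⟩ := (find_eq_coe_iff (s.drop k) pvStartTag p).mp hp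
      have hp7 : p + 7 ≤ n := by
        have := occ_bound (by simp [pvStartTag]) hoccp
        simp [pvStartTag] at this
        omega
      have hspv : PySem.Chars.findFrom s pvStartTag (k : Int) = ((k + p : Nat) : Int) := by
        rw [PySem.Chars.findFrom_natCast s pvStartTag k hk, hp,
          if_neg (by omega : ¬ ((p : Nat) : Int) = -1)]
        omega
      rcases no_overlap hoccp hocce with hpe | hep
      · -- page case: the first end tag lies after the start tag
        have hlen7 : k + p + 7 ≤ s.length := by omega
        have hdropeq : s.drop (k + p + 7) = (s.drop k).drop (p + 7) := by
          rw [List.drop_drop, ← Nat.add_assoc]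
        have hfe : PySem.Chars.find ((s.drop k).drop (p + 7)) pvEndTag
            = ((e - (p + 7) : Nat) : Int) := by
          rw [find_eq_coe_iff]
          constructor
          · rw [List.drop_drop]
            have : p + 7 + (e - (p + 7)) = e := by omega
            rw [this]
            exact hocce
          · intro i hi hc
            rw [List.drop_drop] at hc
            exact hmine (p + 7 + i) (by omega) hc
        have hendv : PySem.Chars.findFrom s pvEndTag ((k + p + 7 : Nat) : Int)
            = ((k + e : Nat) : Int) := by
          rw [PySem.Chars.findFrom_natCast s pvEndTag (k + p + 7) hlen7, hdropeq, hfe,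
            if_neg (by omega : ¬ ((e - (p + 7) : Nat) : Int) = -1)]
          omega
        -- the two appended slices agree
        have hsliceA : PySem.Chars.slice s (some ((k + p + 7 : Nat) : Int))
            (some ((k + e : Nat) : Int)) = ((s.drop k).drop (p + 7)).take (e - (p + 7)) := by
          rw [PySem.Chars.slice_eq_listSlice, PySem.List.slice_natCast, hdropeq]
          congr 1
          omega
        have hsegfind : PySem.Chars.find ((s.drop k).take e) pvStartTag = (p : Int) := by
          rw [find_eq_coe_iff]
          constructor
          · rw [List.drop_take]
            rw [List.prefix_take_iff]
            exact ⟨hoccp, by simp [pvStartTag]; omega⟩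
          · intro i hi hc
            rw [List.drop_take, List.prefix_take_iff] at hc
            exact hminp i hi hc.1
        have hsliceB : PySem.Chars.slice ((s.drop k).take e) (some ((p : Int) + 7)) none
            = ((s.drop k).drop (p + 7)).take (e - (p + 7)) := by
          have : ((p : Int) + 7) = ((p + 7 : Nat) : Int) := by omega
          rw [PySem.Chars.slice_eq_listSlice, this, PySem.List.slice_from_natCast,
            List.drop_take]
        -- unfold one step on each side
        have hlhs : dumpToPagesGo s (fA' + 1) k ret
            = dumpToPagesGo s fA' (k + e + 8)
                (ret ++ [((s.drop k).drop (p + 7)).take (e - (p + 7))]) := by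
          simp only [dumpToPagesGo, hspv,
            if_neg (by omega : ¬ ((k + p : Nat) : Int) = -1)]
          have hc1 : ((k + p : Nat) : Int).toNat + 7 = k + p + 7 := by omega
          rw [hc1, hendv, if_neg (by omega : ¬ ((k + e : Nat) : Int) = -1), hsliceA]
          have hc2 : ((k + e : Nat) : Int).toNat + 8 = k + e + 8 := by omega
          rw [hc2]
        have hrhs : dumpToPagesAltGo (s.drop k) (fB' + 1) ret
            = dumpToPagesAltGo (s.drop (k + (e + 8))) fB'
                (ret ++ [((s.drop k).drop (p + 7)).take (e - (p + 7))]) := by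
          simp only [dumpToPagesAltGo, hen, if_neg (by omega : ¬ ((e : Nat) : Int) = -1),
            hseg, hsegfind, hrest]
          rw [if_pos (by omega : ¬ ((p : Nat) : Int) = -1), hsliceB]
        rw [hlhs, hrhs]
        have : k + e + 8 = k + (e + 8) := by omega
        rw [this]
        exact ih (n - (e + 8)) (by omega) s (k + (e + 8)) _ fA' fB'
          (by omega) (by omega) (by omega) (by omega)
      · -- early-end case: the first end tag precedes the start tag; B skips it,
        -- A's cursor may jump over it without losing the start tag
        have hsegfind : PySem.Chars.find ((s.drop k).take e) pvStartTag = -1 := by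
          rw [PySem.Chars.find_eq_neg_one_iff]
          intro hc
          rcases (infix_iff_drop _ _).mp hc with ⟨i, hi⟩
          rw [List.drop_take, List.prefix_take_iff] at hi
          have h7 : pvStartTag.length = 7 := by simp [pvStartTag]
          rw [h7] at hi
          exact hminp i (by omega) hi.1
        have hrhs : dumpToPagesAltGo (s.drop k) (fB' + 1) ret
            = dumpToPagesAltGo (s.drop (k + (e + 8))) fB' ret := by
          simp only [dumpToPagesAltGo, hen, if_neg (by omega : ¬ ((e : Nat) : Int) = -1),
            hseg, hsegfind, hrest]
          simp only [ne_eq, not_true_eq_false, if_false]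
        have hshift : dumpToPagesGo s (fA' + 1) k ret
            = dumpToPagesGo s (fA' + 1) (k + (e + 8)) ret := by
          apply go_shift s fA' k (k + (e + 8)) ret (by omega) (by omega)
          intro j hkj hjlt hc
          have : s.drop j = (s.drop k).drop (j - k) := by
            rw [List.drop_drop]
            congr 1
            omega
          rw [this] at hc
          exact hminp (j - k) (by omega) hc
        rw [hrhs, hshift]
        exact ih (n - (e + 8)) (by omega) s (k + (e + 8)) ret (fA' + 1) fB'
          (by omega) (by omega) (by omega) (by omega)

-- ===== VERDICT (by name: the statement is the Claim_ definition above) =====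
theorem dump_to_pages_py_spec : Claim_equal_dump_to_pages_py := by
  intro dump _
  unfold Spec_dump_to_pages_py dump_to_pages_py dump_to_pages_py_alt
  have h := main_lemma dump.toList.length dump.toList 0 [] (dump.toList.length + 1)
    (dump.toList.length + 1) (by omega) (by omega) (by omega) (by omega)
  simp only [List.drop_zero] at h
  rw [h]
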